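-- pv_equiv track=rewrite | github.com/andersalavik/el-labb | sim/core.py | _find_floating_nodes
-- ===== SOURCE A (Python) =====
-- def _find_floating_nodes(node_count, elements):
--     if node_count <= 1:
--         return set(), set(), set()
--     adjacency = [set() for _ in range(node_count)]
--     active = set()
--     for elem in elements:
--         n1 = elem.get("n1")
--         n2 = elem.get("n2")
--         if n1 is None or n2 is None:
--             continue
--         active.add(n1)
--         active.add(n2)
--         adjacency[n1].add(n2)
--         adjacency[n2].add(n1)
--     if not active:
--         return set(), set(), set()
--     reachable = set()
--     stack = [0] if 0 in active else []
--     while stack: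
--         node = stack.pop()
--         if node in reachable:
--             continue
--         reachable.add(node)
--         stack.extend(adjacency[node])
--     floating = active - reachable
--     return floating, reachable, active
-- ===== SOURCE B (Python) =====
-- def _find_floating_nodes(node_count, elements):
--     if node_count <= 1:
--         return set(), set(), set()
--     edges = []
--     active = set()
--     for elem in elements:
--         n1 = elem.get("n1")
--         n2 = elem.get("n2")
--         if n1 is None or n2 is None:
--             continue
--         active.add(n1)
--         active.add(n2)
--         edges.append((n1, n2))
--     if not active:
--         return set(), set(), set()
--     reachable = {0} & active
--     while True:
--         nxt = reachable | {b for (a, b) in edges if a in reachable}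
--         nxt = nxt | {a for (a, b) in edges if b in nxt}
--         if nxt == reachable:
--             break
--         reachable = nxt
--     floating = active - reachable
--     return floating, reachable, active
-- ===== Notes on version B (the rewrite author's own statement) =====
-- stated objective: alternative
-- what changed: Replaced the node_count-sized adjacency-of-sets array plus explicit DFS stack with an edge list saturated by label propagation (union rounds over the edge list until the reachable set stops growing), so no per-node array indexed by node_count is built.
import Mathlib
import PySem

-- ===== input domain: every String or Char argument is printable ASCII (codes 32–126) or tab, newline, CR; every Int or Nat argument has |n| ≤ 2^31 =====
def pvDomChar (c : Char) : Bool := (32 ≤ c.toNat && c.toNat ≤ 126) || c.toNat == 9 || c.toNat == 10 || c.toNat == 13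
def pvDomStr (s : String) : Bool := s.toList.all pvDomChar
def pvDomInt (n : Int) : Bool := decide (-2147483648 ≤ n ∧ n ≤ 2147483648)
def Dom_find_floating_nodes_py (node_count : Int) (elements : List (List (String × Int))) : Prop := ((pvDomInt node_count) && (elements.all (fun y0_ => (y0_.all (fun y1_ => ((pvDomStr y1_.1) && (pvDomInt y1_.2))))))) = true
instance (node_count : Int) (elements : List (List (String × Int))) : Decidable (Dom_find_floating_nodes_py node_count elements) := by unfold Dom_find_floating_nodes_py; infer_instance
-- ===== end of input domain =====

-- ===== PORT A =====
-- B replaces the adjacency array + DFS stack with an edge list saturated by label propagation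
-- (alternative decomposition, not claimed faster); both Pythons return sets, whose iteration
-- order is not modelled: each port serializes the returned sets in active-insertion order
-- (floating/active already are; reachable is serialized as Set.inter active reachable, equal as a set).

-- adjacency[i].add(v)  (pyGet? none = IndexError in Python; those inputs are outside Pre_)
def pvAdjAdd (adj : List (PySem.Set Int)) (i v : Int) : List (PySem.Set Int) :=
  match PySem.List.pyGet? adj i with
  | some s => PySem.List.pySetD adj i (PySem.Set.add s v)
  | none => adj

-- the body of A's 'for elem in elements' loop: state = (adjacency, active)
def pvLoopA (st : List (PySem.Set Int) × PySem.Set Int) (elem : List (String × Int)) :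
    List (PySem.Set Int) × PySem.Set Int :=
  match (PySem.Dict.mk elem).get? "n1", (PySem.Dict.mk elem).get? "n2" with
  | some n1, some n2 =>
      (pvAdjAdd (pvAdjAdd st.1 n1 n2) n2 n1,
       PySem.Set.add (PySem.Set.add st.2 n1) n2)
  | _, _ => st

-- A's 'while stack' DFS loop; fuel makes the terminating Python loop structural; the stack is
-- consumed from the head (which end is popped only permutes the unmodelled set order).
def pvBfs (adj : List (PySem.Set Int)) : Nat → List Int → PySem.Set Int → PySem.Set Int
  | 0, _, reach => reach
  | _ + 1, [], reach => reach
  | fuel + 1, node :: stack, reach =>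
      if PySem.Set.contains reach node then pvBfs adj fuel stack reach
      else pvBfs adj fuel (stack ++ PySem.List.pyGetD adj node PySem.Set.empty)
             (PySem.Set.add reach node)

def find_floating_nodes_py (node_count : Int) (elements : List (List (String × Int))) :
    List Int × List Int × List Int :=
  if node_count ≤ 1 then ([], [], [])
  else
    let st := elements.foldl pvLoopA
      ((PySem.List.pyRange 0 node_count 1).map (fun _ => (PySem.Set.empty : PySem.Set Int)),
       (PySem.Set.empty : PySem.Set Int))
    let adjacency := st.1
    let active := st.2
    if active.isEmpty then ([], [], [])
    else
      let stack : List Int := if PySem.Set.contains active 0 then [0] else []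
      let reachable := pvBfs adjacency (1 + (active.length + 1) * (active.length + 2)) stack
        PySem.Set.empty
      (PySem.Set.diff active reachable, PySem.Set.inter active reachable, active)

-- ===== PORT B =====
-- the body of B's 'for elem in elements' loop: state = (edges, active)
def pvLoopB (st : List (Int × Int) × PySem.Set Int) (elem : List (String × Int)) :
    List (Int × Int) × PySem.Set Int :=
  match (PySem.Dict.mk elem).get? "n1", (PySem.Dict.mk elem).get? "n2" with
  | some n1, some n2 =>
      (st.1 ++ [(n1, n2)], PySem.Set.add (PySem.Set.add st.2 n1) n2)
  | _, _ => st

-- one round of B's label propagation (the two set-comprehension unions)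
def pvRound (edges : List (Int × Int)) (r : PySem.Set Int) : PySem.Set Int :=
  let r1 := PySem.Set.update r ((edges.filter (fun e => PySem.Set.contains r e.1)).map (fun e => e.2))
  PySem.Set.update r1 ((edges.filter (fun e => PySem.Set.contains r1 e.2)).map (fun e => e.1))

-- B's 'while True' saturation loop; fuel makes the terminating Python loop structural
def pvProp (edges : List (Int × Int)) : Nat → PySem.Set Int → PySem.Set Int
  | 0, r => r
  | fuel + 1, r =>
      if PySem.Set.equal (pvRound edges r) r then r else pvProp edges fuel (pvRound edges r)

def find_floating_nodes_py_alt (node_count : Int) (elements : List (List (String × Int))) :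
    List Int × List Int × List Int :=
  if node_count ≤ 1 then ([], [], [])
  else
    let st := elements.foldl pvLoopB ([], (PySem.Set.empty : PySem.Set Int))
    let edges := st.1
    let active := st.2
    if active.isEmpty then ([], [], [])
    else
      let reachable := pvProp edges (active.length + 1)
        (PySem.Set.inter (PySem.Set.ofList [0]) active)
      (PySem.Set.diff active reachable, PySem.Set.inter active reachable, active)

-- ===== PRECONDITION & SPEC =====
def pvEdgeOK (nc : Int) (elem : List (String × Int)) : Bool :=
  match (PySem.Dict.mk elem).get? "n1", (PySem.Dict.mk elem).get? "n2" with
  | some n1, some n2 => decide (0 ≤ n1 ∧ n1 < nc ∧ 0 ≤ n2 ∧ n2 < nc)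
  | _, _ => true

-- Pre_ restricts node ids of fully-specified elements to the natural range [0, node_count):
-- outside it A raises IndexError (ids outside [-nc, nc)) or, for negative in-range ids, returns
-- a value produced by accidental Python negative-index wraparound aliasing node -k with nc - k.
def Pre_find_floating_nodes_py (node_count : Int) (elements : List (List (String × Int))) : Prop :=
  node_count ≤ 1 ∨ ∀ e ∈ elements, pvEdgeOK node_count e = true
instance (node_count : Int) (elements : List (List (String × Int))) : Decidable (Pre_find_floating_nodes_py node_count elements) := by unfold Pre_find_floating_nodes_py; infer_instance

def pvWitness_find_floating_nodes_py : Int × (List (List (String × Int))) :=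
  (2, [[("n1", 0), ("n2", 1)]])

def Spec_find_floating_nodes_py (node_count : Int) (elements : List (List (String × Int))) (out : List Int × List Int × List Int) : Prop := out = find_floating_nodes_py_alt node_count elements
instance (node_count : Int) (elements : List (List (String × Int))) (out : List Int × List Int × List Int) : Decidable (Spec_find_floating_nodes_py node_count elements out) := by unfold Spec_find_floating_nodes_py; infer_instance

-- ===== CLAIM (what is proved, stated in full; the proofs are below) =====
def Claim_equal_find_floating_nodes_py : Prop := ∀ (node_count : Int) (elements : List (List (String × Int))), Dom_find_floating_nodes_py node_count elements → Pre_find_floating_nodes_py node_count elements → Spec_find_floating_nodes_py node_count elements (find_floating_nodes_py node_count elements)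

-- ===== LEMMAS AND PROOFS =====

-- the undirected edge relation of B's edge list
def pvRel (edges : List (Int × Int)) (a b : Int) : Prop := (a, b) ∈ edges ∨ (b, a) ∈ edges

-- the adjacency relation of A's adjacency array
def pvRadj (adj : List (PySem.Set Int)) (a b : Int) : Prop :=
  b ∈ PySem.List.pyGetD adj a PySem.Set.empty

-- invariant tying A's adjacency array to B's edge list after processing the same elements
def pvInv (nc : Int) (adj : List (PySem.Set Int)) (active : PySem.Set Int)
    (edges : List (Int × Int)) : Prop :=
  adj.length = nc.toNat ∧ active.Nodup ∧
  (∀ x ∈ active, 0 ≤ x ∧ x < nc) ∧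
  (∀ e ∈ edges, e.1 ∈ active ∧ e.2 ∈ active) ∧
  (∀ a : Int, 0 ≤ a → a < nc →
    (PySem.List.pyGetD adj a PySem.Set.empty).Nodup ∧
    ∀ b : Int, b ∈ PySem.List.pyGetD adj a PySem.Set.empty ↔ pvRel edges a b)

lemma pvNodupLenLe {l l' : List Int} (h : l.Nodup) (s : l ⊆ l') : l.length ≤ l'.length := by
  calc l.length = l.toFinset.card := (List.toFinset_card_of_nodup h).symm
    _ ≤ l'.toFinset.card := Finset.card_le_card (by
        intro x hx
        rw [List.mem_toFinset] at *
        exact s hx)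
    _ ≤ l'.length := l'.toFinset_card_le

lemma pvGetD_set (adj : List (PySem.Set Int)) (i a : Int) (v : PySem.Set Int)
    (hi0 : 0 ≤ i) (_hi : i.toNat < adj.length) (ha0 : 0 ≤ a) (ha : a.toNat < adj.length) :
    PySem.List.pyGetD (PySem.List.pySetD adj i v) a PySem.Set.empty =
      if a = i then v else PySem.List.pyGetD adj a PySem.Set.empty := by
  rw [PySem.List.pySetD_of_nonneg adj v hi0]
  rw [PySem.List.pyGetD_eq_getElem _ PySem.Set.empty ha0
      (by simp only [List.length_set]; omega),
    PySem.List.pyGetD_eq_getElem adj PySem.Set.empty ha0 (by omega)]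
  rw [List.getElem_set]
  have heq : (i.toNat = a.toNat) = (a = i) := by
    apply propext; constructor <;> intro h <;> omega
  simp only [heq]

lemma pvAdjAdd_getD (adj : List (PySem.Set Int)) (nc i v : Int)
    (hlen : adj.length = nc.toNat) (hi0 : 0 ≤ i) (hi : i < nc) :
    (pvAdjAdd adj i v).length = adj.length ∧
    ∀ a : Int, 0 ≤ a → a < nc →
      PySem.List.pyGetD (pvAdjAdd adj i v) a PySem.Set.empty =
        if a = i then PySem.Set.add (PySem.List.pyGetD adj i PySem.Set.empty) v
        else PySem.List.pyGetD adj a PySem.Set.empty := by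
  have hitn : i.toNat < adj.length := by omega
  have hget : PySem.List.pyGet? adj i = some adj[i.toNat] :=
    PySem.List.pyGet?_eq_some_getElem adj hi0 (by omega)
  have hgetD : PySem.List.pyGetD adj i PySem.Set.empty = adj[i.toNat] :=
    PySem.List.pyGetD_eq_getElem adj PySem.Set.empty hi0 (by omega)
  constructor
  · simp [pvAdjAdd, hget, PySem.List.pySetD_of_nonneg adj _ hi0, List.length_set]
  · intro a ha0 ha
    have hatn : a.toNat < adj.length := by omega
    simp only [pvAdjAdd, hget]
    rw [pvGetD_set adj i a _ hi0 hitn ha0 hatn, hgetD]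

lemma pvRel_append (edges : List (Int × Int)) (n1 n2 a b : Int) :
    pvRel (edges ++ [(n1, n2)]) a b ↔ pvRel edges a b ∨ (a = n1 ∧ b = n2) ∨ (a = n2 ∧ b = n1) := by
  simp only [pvRel, List.mem_append, List.mem_singleton, Prod.mk.injEq]
  tauto

lemma pvFold_inv (nc : Int) (elements : List (List (String × Int)))
    (hpre : ∀ e ∈ elements, pvEdgeOK nc e = true) :
    ∀ (adj : List (PySem.Set Int)) (active : PySem.Set Int) (edges : List (Int × Int)),
    pvInv nc adj active edges →
    (elements.foldl pvLoopA (adj, active)).2 = (elements.foldl pvLoopB (edges, active)).2 ∧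
    pvInv nc (elements.foldl pvLoopA (adj, active)).1
      (elements.foldl pvLoopA (adj, active)).2
      (elements.foldl pvLoopB (edges, active)).1 := by
  induction elements with
  | nil => intro adj active edges hinv; exact ⟨rfl, hinv⟩
  | cons e es ih =>
    intro adj active edges hinv
    have hpe : pvEdgeOK nc e = true := hpre e (by simp)
    have hpes : ∀ e' ∈ es, pvEdgeOK nc e' = true := fun e' he' => hpre e' (by simp [he'])
    simp only [List.foldl_cons]
    cases hget1 : (PySem.Dict.mk e).get? "n1" with
    | none =>
      have hA : pvLoopA (adj, active) e = (adj, active) := by simp [pvLoopA, hget1]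
      have hB : pvLoopB (edges, active) e = (edges, active) := by simp [pvLoopB, hget1]
      rw [hA, hB]; exact ih hpes adj active edges hinv
    | some n1 =>
      cases hget2 : (PySem.Dict.mk e).get? "n2" with
      | none =>
        have hA : pvLoopA (adj, active) e = (adj, active) := by simp [pvLoopA, hget1, hget2]
        have hB : pvLoopB (edges, active) e = (edges, active) := by simp [pvLoopB, hget1, hget2]
        rw [hA, hB]; exact ih hpes adj active edges hinv
      | some n2 =>
        have hbounds : 0 ≤ n1 ∧ n1 < nc ∧ 0 ≤ n2 ∧ n2 < nc := by
          have hx := hpe; unfold pvEdgeOK at hx; rw [hget1, hget2] at hx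
          exact of_decide_eq_true hx
        obtain ⟨hb1, hb2, hb3, hb4⟩ := hbounds
        have hA : pvLoopA (adj, active) e =
            (pvAdjAdd (pvAdjAdd adj n1 n2) n2 n1,
             PySem.Set.add (PySem.Set.add active n1) n2) := by simp [pvLoopA, hget1, hget2]
        have hB : pvLoopB (edges, active) e =
            (edges ++ [(n1, n2)], PySem.Set.add (PySem.Set.add active n1) n2) := by
          simp [pvLoopB, hget1, hget2]
        rw [hA, hB]
        apply ih hpes
        obtain ⟨hlen, hnd, hbound, hends, hadj⟩ := hinv
        have h1 := pvAdjAdd_getD adj nc n1 n2 hlen hb1 hb2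
        have hlen1 : (pvAdjAdd adj n1 n2).length = nc.toNat := by rw [h1.1, hlen]
        have h2 := pvAdjAdd_getD (pvAdjAdd adj n1 n2) nc n2 n1 hlen1 hb3 hb4
        -- characterization of the once-updated adjacency
        have hm1 : ∀ c b : Int, 0 ≤ c → c < nc →
            (b ∈ PySem.List.pyGetD (pvAdjAdd adj n1 n2) c PySem.Set.empty ↔
              pvRel edges c b ∨ (c = n1 ∧ b = n2)) := by
          intro c b hc0 hc
          rw [h1.2 c hc0 hc]
          by_cases he : c = n1
          · rw [if_pos he, PySem.Set.mem_add, (hadj n1 hb1 hb2).2 b]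
            constructor
            · rintro (h | h)
              · left; rcases h with h | h
                · left; rw [he]; exact h
                · right; rw [he]; exact h
              · right; exact ⟨he, h⟩
            · rintro (h | ⟨_, h⟩)
              · left; rcases h with h | h
                · left; rw [he] at h; exact h
                · right; rw [he] at h; exact h
              · right; exact h
          · rw [if_neg he, (hadj c hc0 hc).2 b]
            constructor
            · intro h; exact Or.inl h
            · rintro (h | ⟨h, _⟩)
              · exact h
              · exact absurd h he
        have hnd1 : ∀ c : Int, 0 ≤ c → c < nc →
            (PySem.List.pyGetD (pvAdjAdd adj n1 n2) c PySem.Set.empty).Nodup := by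
          intro c hc0 hc
          rw [h1.2 c hc0 hc]
          by_cases he : c = n1
          · rw [if_pos he]; exact PySem.Set.nodup_add _ _ (hadj n1 hb1 hb2).1
          · rw [if_neg he]; exact (hadj c hc0 hc).1
        refine ⟨by rw [h2.1, hlen1], ?_, ?_, ?_, ?_⟩
        · exact PySem.Set.nodup_add _ _ (PySem.Set.nodup_add _ _ hnd)
        · intro x hx
          rw [PySem.Set.mem_add] at hx
          rcases hx with hx | hx
          · rw [PySem.Set.mem_add] at hx
            rcases hx with hx | hx
            · exact hbound x hx
            · subst hx; exact ⟨hb1, hb2⟩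
          · subst hx; exact ⟨hb3, hb4⟩
        · intro ed hed
          rw [List.mem_append] at hed
          have hmon : ∀ y : Int, y ∈ active → y ∈ PySem.Set.add (PySem.Set.add active n1) n2 := by
            intro y hy; rw [PySem.Set.mem_add, PySem.Set.mem_add]; tauto
          rcases hed with hed | hed
          · exact ⟨hmon _ (hends ed hed).1, hmon _ (hends ed hed).2⟩
          · rw [List.mem_singleton] at hed; subst hed
            constructor
            · rw [PySem.Set.mem_add, PySem.Set.mem_add]; tauto
            · rw [PySem.Set.mem_add]; tauto
        · intro a ha0 ha
          constructor
          · rw [h2.2 a ha0 ha]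
            by_cases he : a = n2
            · rw [if_pos he]; exact PySem.Set.nodup_add _ _ (hnd1 n2 hb3 hb4)
            · rw [if_neg he]; exact hnd1 a ha0 ha
          · intro b
            rw [pvRel_append, h2.2 a ha0 ha]
            by_cases he : a = n2
            · rw [if_pos he, PySem.Set.mem_add, hm1 n2 b hb3 hb4]
              constructor
              · rintro ((h | ⟨h1', h2'⟩) | h)
                · left
                  rcases h with h | h
                  · left; rw [he]; exact h
                  · right; rw [he]; exact h
                · right; left; exact ⟨he.trans h1', h2'⟩
                · right; right; exact ⟨he, h⟩
              · rintro (h | ⟨h1', h2'⟩ | ⟨_, h2'⟩)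
                · left; left
                  rcases h with h | h
                  · left; rw [he] at h; exact h
                  · right; rw [he] at h; exact h
                · left; right; exact ⟨he.symm.trans h1', h2'⟩
                · right; exact h2'
            · rw [if_neg he, hm1 a b ha0 ha]
              tauto

lemma pvInv_init (nc : Int) (hnc : 1 < nc) :
    pvInv nc ((PySem.List.pyRange 0 nc 1).map (fun _ => (PySem.Set.empty : PySem.Set Int)))
      PySem.Set.empty [] := by
  refine ⟨?_, List.nodup_nil, by simp [PySem.Set.empty], by simp, ?_⟩
  · rw [List.length_map, PySem.List.length_pyRange_one]
    omega
  · intro a ha0 ha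
    have hget : PySem.List.pyGetD
        ((PySem.List.pyRange 0 nc 1).map (fun _ => (PySem.Set.empty : PySem.Set Int))) a
        PySem.Set.empty = PySem.Set.empty :=
      PySem.List.pyGetD_map_pyRange_of_nonneg _ nc a _ ha0 ha
    rw [hget]
    exact ⟨List.nodup_nil, by simp [PySem.Set.empty, pvRel]⟩

-- DFS escape: anything reachable from a visited node is visited or reachable from the stack
lemma pvReach_escape (adj : List (PySem.Set Int)) (reach stack : List Int)
    (inv : ∀ a ∈ reach, ∀ b : Int, pvRadj adj a b → b ∈ reach ∨ b ∈ stack) :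
    ∀ s x : Int, Relation.ReflTransGen (pvRadj adj) s x → s ∈ reach →
      x ∈ reach ∨ ∃ t ∈ stack, Relation.ReflTransGen (pvRadj adj) t x := by
  intro s x h
  induction h using Relation.ReflTransGen.head_induction_on with
  | refl => intro hs; exact Or.inl hs
  | head h' hrt ih =>
    intro ha
    rcases inv _ ha _ h' with hc | hc
    · exact ih hc
    · exact Or.inr ⟨_, hc, hrt⟩

lemma pvBfs_nil (adj : List (PySem.Set Int)) (fuel : Nat) (reach : PySem.Set Int) :
    pvBfs adj fuel [] reach = reach := by cases fuel <;> rfl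

-- the DFS loop computes exactly the nodes reachable from the stack (given enough fuel)
lemma pvBfs_mem (adj : List (PySem.Set Int)) (V : List Int) (M : Nat)
    (hadj : ∀ a ∈ V, (PySem.List.pyGetD adj a PySem.Set.empty).Nodup ∧
      (PySem.List.pyGetD adj a PySem.Set.empty).length ≤ M ∧
      ∀ b ∈ PySem.List.pyGetD adj a PySem.Set.empty, b ∈ V) :
    ∀ (fuel : Nat) (stack : List Int) (reach : PySem.Set Int),
    reach.Nodup → (∀ x ∈ reach, x ∈ V) → (∀ x ∈ stack, x ∈ V) →
    (∀ a ∈ reach, ∀ b : Int, pvRadj adj a b → b ∈ reach ∨ b ∈ stack) →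
    stack.length + (V.length - reach.length) * (M + 1) ≤ fuel →
    ∀ x : Int, x ∈ pvBfs adj fuel stack reach ↔
      x ∈ reach ∨ ∃ s ∈ stack, Relation.ReflTransGen (pvRadj adj) s x := by
  intro fuel
  induction fuel with
  | zero =>
    intro stack reach _ _ _ _ hfuel x
    have hst : stack = [] := by
      cases stack with
      | nil => rfl
      | cons a l => simp at hfuel
    subst hst
    simp [pvBfs]
  | succ fuel ih =>
    intro stack reach hnd hreachV hstackV inv hfuel x
    cases stack with
    | nil => simp [pvBfs]
    | cons node rest =>
      by_cases hvis : node ∈ reach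
      · have hcont : PySem.Set.contains reach node = true :=
          (PySem.Set.contains_iff reach node).mpr hvis
        have hstep : pvBfs adj (fuel + 1) (node :: rest) reach = pvBfs adj fuel rest reach := by
          simp only [pvBfs]
          rw [if_pos hcont]
        rw [hstep]
        have inv' : ∀ a ∈ reach, ∀ b : Int, pvRadj adj a b → b ∈ reach ∨ b ∈ rest := by
          intro a ha b hb
          rcases inv a ha b hb with h | h
          · exact Or.inl h
          · rcases List.mem_cons.mp h with h | h
            · subst h; exact Or.inl hvis
            · exact Or.inr h
        rw [ih rest reach hnd hreachV (fun y hy => hstackV y (by simp [hy])) inv' (by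
          simp only [List.length_cons] at hfuel; omega) x]
        constructor
        · rintro (h | ⟨s, hs, hrtg⟩)
          · exact Or.inl h
          · exact Or.inr ⟨s, by simp [hs], hrtg⟩
        · rintro (h | ⟨s, hs, hrtg⟩)
          · exact Or.inl h
          · rcases List.mem_cons.mp hs with h | h
            · subst h
              exact pvReach_escape adj reach rest inv' s x hrtg hvis
            · exact Or.inr ⟨s, h, hrtg⟩
      · have hcont : PySem.Set.contains reach node = false := by
          rw [← Bool.not_eq_true]
          intro hc
          exact hvis ((PySem.Set.contains_iff reach node).mp hc)
        have hstep : pvBfs adj (fuel + 1) (node :: rest) reach =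
            pvBfs adj fuel (rest ++ PySem.List.pyGetD adj node PySem.Set.empty)
              (PySem.Set.add reach node) := by
          simp only [pvBfs]
          rw [if_neg (by rw [hcont]; exact Bool.false_ne_true)]
        rw [hstep]
        have hnodeV : node ∈ V := hstackV node (by simp)
        have hreach' : PySem.Set.add reach node = reach ++ [node] :=
          PySem.Set.add_of_not_mem hvis
        have hlenr' : (PySem.Set.add reach node).length = reach.length + 1 := by
          rw [hreach']; simp
        have hnd' : (PySem.Set.add reach node).Nodup := PySem.Set.nodup_add _ _ hnd
        have hreachV' : ∀ x ∈ PySem.Set.add reach node, x ∈ V := by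
          intro y hy
          rcases (PySem.Set.mem_add reach node y).mp hy with h | h
          · exact hreachV y h
          · subst h; exact hnodeV
        have hstackV' : ∀ x ∈ rest ++ PySem.List.pyGetD adj node PySem.Set.empty, x ∈ V := by
          intro y hy
          rcases List.mem_append.mp hy with h | h
          · exact hstackV y (by simp [h])
          · exact (hadj node hnodeV).2.2 y h
        have inv' : ∀ a ∈ PySem.Set.add reach node, ∀ b : Int, pvRadj adj a b →
            b ∈ PySem.Set.add reach node ∨ b ∈ rest ++ PySem.List.pyGetD adj node PySem.Set.empty := by
          intro a ha b hb
          rcases (PySem.Set.mem_add reach node a).mp ha with h | h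
          · rcases inv a h b hb with h' | h'
            · exact Or.inl ((PySem.Set.mem_add reach node b).mpr (Or.inl h'))
            · rcases List.mem_cons.mp h' with h' | h'
              · exact Or.inl ((PySem.Set.mem_add reach node b).mpr (Or.inr h'))
              · exact Or.inr (List.mem_append.mpr (Or.inl h'))
          · subst h
            exact Or.inr (List.mem_append.mpr (Or.inr hb))
        have hrlt : reach.length < V.length := by
          have hle : (reach ++ [node]).length ≤ V.length := by
            apply pvNodupLenLe (by rw [← hreach']; exact hnd')
            intro y hy
            rw [← hreach'] at hy
            exact hreachV' y hy
          simp at hle; omega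
        have hfuel' : (rest ++ PySem.List.pyGetD adj node PySem.Set.empty).length +
            (V.length - (PySem.Set.add reach node).length) * (M + 1) ≤ fuel := by
          rw [List.length_append, hlenr']
          have hflen : (PySem.List.pyGetD adj node PySem.Set.empty).length ≤ M :=
            (hadj node hnodeV).2.1
          obtain ⟨k, hk⟩ : ∃ k, V.length - reach.length = k + 1 :=
            ⟨V.length - reach.length - 1, by omega⟩
          simp only [List.length_cons] at hfuel
          rw [hk] at hfuel
          have hsplit : (k + 1) * (M + 1) = k * (M + 1) + (M + 1) := by ring
          rw [hsplit] at hfuel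
          have heq2 : V.length - (reach.length + 1) = k := by omega
          rw [heq2]
          generalize k * (M + 1) = P at *
          omega
        rw [ih _ _ hnd' hreachV' hstackV' inv' hfuel' x]
        constructor
        · rintro (h | ⟨s, hs, hrtg⟩)
          · rcases (PySem.Set.mem_add reach node x).mp h with h | h
            · exact Or.inl h
            · exact Or.inr ⟨node, by simp, by rw [h]⟩
          · rcases List.mem_append.mp hs with h | h
            · exact Or.inr ⟨s, by simp [h], hrtg⟩
            · exact Or.inr ⟨node, by simp, Relation.ReflTransGen.head h hrtg⟩
        · rintro (h | ⟨s, hs, hrtg⟩)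
          · exact Or.inl ((PySem.Set.mem_add reach node x).mpr (Or.inl h))
          · rcases List.mem_cons.mp hs with h | h
            · rw [h] at hrtg
              rcases Relation.ReflTransGen.cases_head hrtg with h2 | ⟨c, hc, hcx⟩
              · exact Or.inl ((PySem.Set.mem_add reach node x).mpr (Or.inr h2.symm))
              · exact Or.inr ⟨c, List.mem_append.mpr (Or.inr hc), hcx⟩
            · exact Or.inr ⟨s, List.mem_append.mpr (Or.inl h), hrtg⟩

-- ===== B-side lemmas =====

lemma pvMem_pvRound_self (edges : List (Int × Int)) (r : PySem.Set Int) :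
    ∀ x ∈ r, x ∈ pvRound edges r := by
  intro x hx
  unfold pvRound
  rw [PySem.Set.mem_update]
  exact Or.inl ((PySem.Set.mem_update _ _ _).mpr (Or.inl hx))

lemma pvNodup_pvRound (edges : List (Int × Int)) (r : PySem.Set Int) (h : r.Nodup) :
    (pvRound edges r).Nodup :=
  PySem.Set.nodup_update _ _ (PySem.Set.nodup_update _ _ h)

lemma pvRound_subset_closed (edges : List (Int × Int)) (r : PySem.Set Int) (C : Int → Prop)
    (hC : ∀ a b : Int, C a → pvRel edges a b → C b) (hr : ∀ x ∈ r, C x) :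
    ∀ x ∈ pvRound edges r, C x := by
  have hr1 : ∀ x ∈ PySem.Set.update r
      ((edges.filter (fun e => PySem.Set.contains r e.1)).map (fun e => e.2)), C x := by
    intro x hx
    rcases (PySem.Set.mem_update _ _ _).mp hx with h | h
    · exact hr x h
    · rcases List.mem_map.mp h with ⟨e, he, hxe⟩
      rcases List.mem_filter.mp he with ⟨heE, hef⟩
      have ha : C e.1 := hr e.1 ((PySem.Set.contains_iff _ _).mp hef)
      subst hxe
      exact hC e.1 e.2 ha (Or.inl (by simpa using heE))
  intro x hx
  unfold pvRound at hx
  rcases (PySem.Set.mem_update _ _ _).mp hx with h | h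
  · exact hr1 x h
  · rcases List.mem_map.mp h with ⟨e, he, hxe⟩
    rcases List.mem_filter.mp he with ⟨heE, hef⟩
    have ha : C e.2 := hr1 e.2 ((PySem.Set.contains_iff _ _).mp hef)
    subst hxe
    exact hC e.2 e.1 ha (Or.inr (by simpa using heE))

lemma pvRound_prefix (edges : List (Int × Int)) (r : PySem.Set Int) :
    ∃ t, pvRound edges r = r ++ t := by
  unfold pvRound
  rw [PySem.Set.update_eq_append_filter, PySem.Set.update_eq_append_filter]
  exact ⟨_, by rw [List.append_assoc]⟩

lemma pvRound_equal_iff (edges : List (Int × Int)) (r : PySem.Set Int) (h : r.Nodup) :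
    PySem.Set.equal (pvRound edges r) r = true ↔ pvRound edges r = r := by
  constructor
  · intro heq
    obtain ⟨t, ht⟩ := pvRound_prefix edges r
    have hmem : ∀ x, x ∈ pvRound edges r ↔ x ∈ r := (PySem.Set.equal_iff _ _).mp heq
    cases t with
    | nil => rw [ht]; simp
    | cons y ys =>
      exfalso
      have hy : y ∈ pvRound edges r := by rw [ht]; simp
      have hy' : y ∈ r := (hmem y).mp hy
      have hndr : (pvRound edges r).Nodup := pvNodup_pvRound edges r h
      rw [ht] at hndr
      rcases List.nodup_append.mp hndr with ⟨_, _, hdisj⟩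
      exact hdisj y hy' y (by simp) rfl
  · intro heq
    rw [heq, PySem.Set.equal_iff]
    intro x; rfl

lemma pvRound_fixed_closed (edges : List (Int × Int)) (r : PySem.Set Int)
    (hfix : pvRound edges r = r) :
    ∀ a b : Int, a ∈ r → pvRel edges a b → b ∈ r := by
  have hr1sub : ∀ x ∈ PySem.Set.update r
      ((edges.filter (fun e => PySem.Set.contains r e.1)).map (fun e => e.2)), x ∈ r := by
    intro x hx
    have hx' : x ∈ pvRound edges r := by
      unfold pvRound
      rw [PySem.Set.mem_update]
      exact Or.inl hx
    rwa [hfix] at hx'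
  intro a b ha hab
  rcases hab with hab | hab
  · apply hr1sub
    rw [PySem.Set.mem_update]
    refine Or.inr (List.mem_map.mpr ⟨(a, b), List.mem_filter.mpr ⟨hab, ?_⟩, rfl⟩)
    exact (PySem.Set.contains_iff _ _).mpr ha
  · have hb : b ∈ pvRound edges r := by
      unfold pvRound
      rw [PySem.Set.mem_update]
      refine Or.inr (List.mem_map.mpr ⟨(b, a), List.mem_filter.mpr ⟨hab, ?_⟩, rfl⟩)
      exact (PySem.Set.contains_iff _ _).mpr
        ((PySem.Set.mem_update _ _ _).mpr (Or.inl ha))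
    rwa [hfix] at hb

lemma pvProp_self (edges : List (Int × Int)) :
    ∀ (fuel : Nat) (r : PySem.Set Int), ∀ x ∈ r, x ∈ pvProp edges fuel r := by
  intro fuel
  induction fuel with
  | zero => intro r x hx; exact hx
  | succ fuel ih =>
    intro r x hx
    unfold pvProp
    by_cases heq : PySem.Set.equal (pvRound edges r) r = true
    · rw [if_pos heq]; exact hx
    · rw [if_neg heq]
      exact ih (pvRound edges r) x (pvMem_pvRound_self edges r x hx)

lemma pvProp_subset_closed (edges : List (Int × Int)) (C : Int → Prop)
    (hC : ∀ a b : Int, C a → pvRel edges a b → C b) :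
    ∀ (fuel : Nat) (r : PySem.Set Int), (∀ x ∈ r, C x) → ∀ x ∈ pvProp edges fuel r, C x := by
  intro fuel
  induction fuel with
  | zero => intro r hr x hx; exact hr x hx
  | succ fuel ih =>
    intro r hr x hx
    unfold pvProp at hx
    by_cases heq : PySem.Set.equal (pvRound edges r) r = true
    · rw [if_pos heq] at hx; exact hr x hx
    · rw [if_neg heq] at hx
      exact ih (pvRound edges r) (pvRound_subset_closed edges r C hC hr) x hx

-- with enough fuel the saturation loop reaches a fixed point of pvRound
lemma pvProp_saturates (edges : List (Int × Int)) (active : PySem.Set Int)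
    (hends : ∀ e ∈ edges, e.1 ∈ active ∧ e.2 ∈ active) :
    ∀ (fuel : Nat) (r : PySem.Set Int), r.Nodup → (∀ x ∈ r, x ∈ active) →
    active.length + 1 ≤ fuel + r.length →
    pvRound edges (pvProp edges fuel r) = pvProp edges fuel r := by
  intro fuel
  induction fuel with
  | zero =>
    intro r hnd hsub hfuel
    exact absurd (pvNodupLenLe hnd hsub) (by omega)
  | succ fuel ih =>
    intro r hnd hsub hfuel
    unfold pvProp
    by_cases heq : PySem.Set.equal (pvRound edges r) r = true
    · rw [if_pos heq]
      exact (pvRound_equal_iff edges r hnd).mp heq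
    · rw [if_neg heq]
      obtain ⟨t, ht⟩ := pvRound_prefix edges r
      have htne : t ≠ [] := by
        intro h0
        apply heq
        rw [pvRound_equal_iff edges r hnd, ht, h0, List.append_nil]
      have hlen : r.length + 1 ≤ (pvRound edges r).length := by
        rw [ht, List.length_append]
        cases t with
        | nil => exact absurd rfl htne
        | cons _ _ => simp
      apply ih (pvRound edges r) (pvNodup_pvRound edges r hnd)
        (pvRound_subset_closed edges r (· ∈ active)
          (fun a b _ hab => by
            rcases hab with h | h
            · exact (hends _ h).2
            · exact (hends _ h).1) hsub)
      omega

lemma pvRound_empty (edges : List (Int × Int)) : pvRound edges [] = [] := by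
  have hf : ∀ (f : Int × Int → Int),
      edges.filter (fun e => PySem.Set.contains ([] : List Int) (f e)) = [] := by
    intro f
    apply List.filter_eq_nil_iff.mpr
    intro e _
    simp [PySem.Set.contains]
  unfold pvRound
  rw [hf (fun e => e.1)]
  simp only [PySem.Set.update, List.foldl_nil, List.map_nil]
  rw [hf (fun e => e.2)]
  rfl

lemma pvProp_empty (edges : List (Int × Int)) (fuel : Nat) : pvProp edges fuel [] = [] := by
  cases fuel with
  | zero => rfl
  | succ fuel =>
    unfold pvProp
    rw [if_pos]
    rw [pvRound_empty]
    exact (PySem.Set.equal_iff _ _).mpr (fun x => Iff.rfl)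

-- transfer of reachability along two relations that agree on a closed domain
lemma pvRTG_preserve {R : Int → Int → Prop} {W : Int → Prop}
    (hR : ∀ a b : Int, W a → R a b → W b) :
    ∀ s x : Int, Relation.ReflTransGen R s x → W s → W x := by
  intro s x h
  induction h with
  | refl => exact id
  | tail _ hbc ih => intro hs; exact hR _ _ (ih hs) hbc

lemma pvRTG_congr {R S : Int → Int → Prop} {W : Int → Prop}
    (hiff : ∀ a b : Int, W a → (R a b ↔ S a b))
    (hR : ∀ a b : Int, W a → R a b → W b) :
    ∀ s x : Int, W s → (Relation.ReflTransGen R s x ↔ Relation.ReflTransGen S s x) := by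
  have hS : ∀ a b : Int, W a → S a b → W b := by
    intro a b ha hab
    exact hR a b ha ((hiff a b ha).mpr hab)
  intro s x hs
  constructor
  · intro h
    induction h with
    | refl => exact Relation.ReflTransGen.refl
    | tail hab hbc ih =>
      exact Relation.ReflTransGen.tail ih
        ((hiff _ _ (pvRTG_preserve hR _ _ hab hs)).mp hbc)
  · intro h
    induction h with
    | refl => exact Relation.ReflTransGen.refl
    | tail hab hbc ih =>
      exact Relation.ReflTransGen.tail ih
        ((hiff _ _ (pvRTG_preserve hS _ _ hab hs)).mpr hbc)

lemma pvFilter_congr (active r r' : PySem.Set Int) (h : ∀ x : Int, x ∈ r ↔ x ∈ r') :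
    PySem.Set.diff active r = PySem.Set.diff active r' ∧
    PySem.Set.inter active r = PySem.Set.inter active r' := by
  have hc : ∀ x : Int, PySem.Set.contains r x = PySem.Set.contains r' x := by
    intro x
    cases hcr : PySem.Set.contains r x
    · cases hcr' : PySem.Set.contains r' x
      · rfl
      · exfalso
        have hx : x ∈ r := (h x).mpr ((PySem.Set.contains_iff _ _).mp hcr')
        rw [← PySem.Set.contains_iff, hcr] at hx
        exact Bool.false_ne_true hx
    · have hx : x ∈ r' := (h x).mp ((PySem.Set.contains_iff _ _).mp hcr)
      rw [← PySem.Set.contains_iff] at hx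
      rw [hx]
  constructor
  · unfold PySem.Set.diff
    exact List.filter_congr (fun x _ => by rw [hc x])
  · unfold PySem.Set.inter
    exact List.filter_congr (fun x _ => by rw [hc x])

-- ===== main assembly =====

theorem pvMainEq (nc : Int) (elements : List (List (String × Int)))
    (hpre : Pre_find_floating_nodes_py nc elements) :
    find_floating_nodes_py nc elements = find_floating_nodes_py_alt nc elements := by
  by_cases h1 : nc ≤ 1
  · unfold find_floating_nodes_py find_floating_nodes_py_alt
    rw [if_pos h1, if_pos h1]
  · have hnc : 1 < nc := by omega
    have hpre' : ∀ e ∈ elements, pvEdgeOK nc e = true := by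
      rcases hpre with h | h
      · omega
      · exact h
    obtain ⟨hact, hinv⟩ := pvFold_inv nc elements hpre'
      ((PySem.List.pyRange 0 nc 1).map (fun _ => (PySem.Set.empty : PySem.Set Int)))
      PySem.Set.empty [] (pvInv_init nc hnc)
    unfold find_floating_nodes_py find_floating_nodes_py_alt
    rw [if_neg h1, if_neg h1]
    simp only []
    set stA := elements.foldl pvLoopA
      ((PySem.List.pyRange 0 nc 1).map (fun _ => (PySem.Set.empty : PySem.Set Int)),
       (PySem.Set.empty : PySem.Set Int)) with hstA
    set stB := elements.foldl pvLoopB ([], (PySem.Set.empty : PySem.Set Int)) with hstB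
    obtain ⟨hlen, hndact, hbound, hends, hadjc⟩ := hinv
    rw [hact] at hndact hbound hends
    rw [hact]
    by_cases hemp : stB.2.isEmpty
    · rw [if_pos hemp, if_pos hemp]
    · rw [if_neg hemp, if_neg hemp]
      set act := stB.2 with hactdef
      set adj := stA.1 with hadjdef
      set edges := stB.1 with hedgesdef
      by_cases hc0 : PySem.Set.contains act 0 = true
      · -- node 0 is active: both sides compute the connected component of 0
        have h0mem : (0 : Int) ∈ act := (PySem.Set.contains_iff _ _).mp hc0
        have hadjhyp : ∀ a ∈ act, (PySem.List.pyGetD adj a PySem.Set.empty).Nodup ∧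
            (PySem.List.pyGetD adj a PySem.Set.empty).length ≤ act.length ∧
            ∀ b ∈ PySem.List.pyGetD adj a PySem.Set.empty, b ∈ act := by
          intro a ha
          obtain ⟨ha0, ha1⟩ := hbound a ha
          have hmemiff := (hadjc a ha0 ha1).2
          have hsub : ∀ b ∈ PySem.List.pyGetD adj a PySem.Set.empty, b ∈ act := by
            intro b hb
            rcases (hmemiff b).mp hb with h | h
            · exact (hends _ h).2
            · exact (hends _ h).1
          exact ⟨(hadjc a ha0 ha1).1, pvNodupLenLe (hadjc a ha0 ha1).1 hsub, hsub⟩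
        have hfuel : ([0] : List Int).length +
            (act.length - (PySem.Set.empty : PySem.Set Int).length) * (act.length + 1) ≤
            1 + (act.length + 1) * (act.length + 2) := by
          have hmul : act.length * (act.length + 1) ≤ (act.length + 1) * (act.length + 2) :=
            Nat.mul_le_mul (by omega) (by omega)
          simp only [PySem.Set.empty, List.length_cons, List.length_nil, Nat.sub_zero]
          omega
        have hmemA := pvBfs_mem adj act act.length hadjhyp
          (1 + (act.length + 1) * (act.length + 2)) [0] PySem.Set.empty
          List.nodup_nil (by simp [PySem.Set.empty]) (by simpa using h0mem)
          (by simp [PySem.Set.empty]) hfuel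
        -- B side: the seed is [0]
        have hseed : PySem.Set.inter (PySem.Set.ofList [0]) act = [0] := by
          show List.filter _ (PySem.Set.ofList [0]) = [0]
          have : PySem.Set.ofList [(0 : Int)] = [0] := rfl
          rw [this]
          simp [h0mem]
        have hsat := pvProp_saturates edges act hends (act.length + 1) [0]
          (by simp) (by simpa using h0mem) (by simp)
        have hmemB : ∀ x : Int, x ∈ pvProp edges (act.length + 1) [0] ↔
            Relation.ReflTransGen (pvRel edges) 0 x := by
          intro x
          constructor
          · intro hx
            exact pvProp_subset_closed edges (Relation.ReflTransGen (pvRel edges) 0)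
              (fun a b ha hab => Relation.ReflTransGen.tail ha hab)
              (act.length + 1) [0]
              (by intro y hy; simp at hy; subst hy; exact Relation.ReflTransGen.refl) x hx
          · intro hx
            induction hx with
            | refl => exact pvProp_self edges (act.length + 1) [0] 0 (by simp)
            | tail hab hbc ih =>
              exact pvRound_fixed_closed edges _ hsat _ _ ih hbc
        -- the two relations agree on [0, nc)
        have hiffrel : ∀ a b : Int, (0 ≤ a ∧ a < nc) → (pvRadj adj a b ↔ pvRel edges a b) :=
          fun a b ⟨h0, h1'⟩ => (hadjc a h0 h1').2 b
        have hRrel : ∀ a b : Int, (0 ≤ a ∧ a < nc) → pvRadj adj a b → (0 ≤ b ∧ b < nc) := by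
          intro a b hw hab
          have hb : pvRel edges a b := (hiffrel a b hw).mp hab
          rcases hb with h | h
          · exact hbound _ (hends _ h).2
          · exact hbound _ (hends _ h).1
        have htrans : ∀ x : Int, Relation.ReflTransGen (pvRadj adj) 0 x ↔
            Relation.ReflTransGen (pvRel edges) 0 x :=
          fun x => pvRTG_congr hiffrel hRrel 0 x ⟨le_refl 0, by omega⟩
        have hmem : ∀ x : Int,
            x ∈ pvBfs adj (1 + (act.length + 1) * (act.length + 2)) [0] PySem.Set.empty ↔
            x ∈ pvProp edges (act.length + 1) [0] := by
          intro x
          rw [hmemA x, hmemB x, ← htrans x]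
          simp [PySem.Set.empty]
        rw [if_pos hc0, hseed]
        obtain ⟨hdiff, hinter⟩ := pvFilter_congr act _ _ hmem
        rw [hdiff, hinter]
      · -- node 0 is not active: both reachable sets are empty
        rw [if_neg hc0]
        have hseed : PySem.Set.inter (PySem.Set.ofList [0]) act = [] := by
          show List.filter _ (PySem.Set.ofList [0]) = []
          have h00 : PySem.Set.ofList [(0 : Int)] = [0] := rfl
          rw [h00]
          simp only [List.filter_cons, List.filter_nil]
          rw [if_neg (by simpa using hc0)]
        rw [hseed, pvBfs_nil, pvProp_empty]
        rfl

-- ===== VERDICT (by name: the statement is the Claim_ definition above) =====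
theorem find_floating_nodes_py_spec : Claim_equal_find_floating_nodes_py := by
  intro node_count elements _ hpre
  exact pvMainEq node_count elements hpre
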